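-- pv_equiv track=rewrite | github.com/FAU-Inf2/IMPACT24RP | code_generator/lib/combinatorics.py | sortedVar
-- ===== SOURCE A (Python) =====
-- def variations(L, n):
--     if (n == 0):
--         return [[]]
--     tp = variations(L, n - 1)
--     res = [ t + [y] for y in L for t in tp if y not in t ]
--     return res
--
-- def sortedVar(L, n):
--     stage = []
--     vars = sorted(variations(L, n))
--     for var in vars:
--         stage.append(sorted(var))
--
--     res = []
--     for s in stage:
--         if s not in res:
--             res.append(s)
--
--     return sorted(res)
-- ===== SOURCE B (Python) =====
-- def _comb(vals, k):
--     # all k-element subsets of the (strictly increasing) list vals,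
--     # in lexicographic order, each subset as an increasing list
--     if k == 0:
--         return [[]]
--     if not vals or len(vals) < k:
--         return []
--     head, rest = vals[0], vals[1:]
--     return [[head] + t for t in _comb(rest, k - 1)] + _comb(rest, k)
--
--
-- def sortedVar(L, n):
--     vals = sorted(set(L))
--     return _comb(vals, n)
-- ===== Notes on version B (the rewrite author's own statement) =====
-- stated objective: alternative
-- what changed: Instead of building all n-permutations of distinct values recursively and then sorting, re-sorting each one and deduplicating, B sorts the distinct values once and emits the n-element combinations directly by structural recursion (take-head or skip-head), which are already unique and in the required lexicographic order; the output itself can be exponential, so a timing run could not confirm a speedup on that run sizes.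
import Mathlib
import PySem

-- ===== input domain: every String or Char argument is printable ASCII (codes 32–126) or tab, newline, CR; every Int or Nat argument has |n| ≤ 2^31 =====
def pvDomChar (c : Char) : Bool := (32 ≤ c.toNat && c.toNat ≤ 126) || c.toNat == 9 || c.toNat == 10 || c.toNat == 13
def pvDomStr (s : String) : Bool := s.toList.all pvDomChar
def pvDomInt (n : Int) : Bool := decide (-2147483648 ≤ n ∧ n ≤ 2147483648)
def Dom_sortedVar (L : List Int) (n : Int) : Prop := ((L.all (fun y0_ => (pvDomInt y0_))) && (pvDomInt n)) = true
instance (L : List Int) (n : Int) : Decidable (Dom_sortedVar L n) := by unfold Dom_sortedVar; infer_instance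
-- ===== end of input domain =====

-- B replaces A's generate-all-permutations / sort / dedup pipeline by a direct recursive
-- enumeration of the n-element combinations of the sorted distinct values, which are already
-- unique and in the required lexicographic order, so no sorting or dedup pass is needed.

-- ===== PORT A =====
-- variations(L, n): recursion on n; Python recurses n times (Pre_ gives 0 ≤ n ≤ 997; for n < 0
-- and for n ≥ 998 Python raises RecursionError — outside Pre_).
def varsA (L : List Int) : Nat → List (List Int)
  | 0 => [[]]
  | k + 1 =>
    let tp := varsA L k
    -- [ t + [y] for y in L for t in tp if y not in t ]
    L.flatMap (fun y => (tp.filter (fun t => !(t.contains y))).map (fun t => t ++ [y]))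

def sortedVar (L : List Int) (n : Int) : List (List Int) :=
  let vars := PySem.List.sorted (varsA L n.toNat) (fun v => v) false
  let stage := vars.foldl (fun acc var => acc ++ [PySem.List.sorted var (fun x => x) false]) []
  let res := stage.foldl (fun acc s => if s ∈ acc then acc else acc ++ [s]) []
  PySem.List.sorted res (fun v => v) false

-- ===== PORT B =====
-- _comb(vals, k) from Source B: take-the-head or skip-the-head structural recursion.
def combB : List Int → Int → List (List Int)
  | [], k => if k = 0 then [[]] else []
  | head :: rest, k =>
    if k = 0 then [[]]
    else ((combB rest (k - 1)).map (fun t => head :: t)) ++ combB rest k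

def sortedVar_alt (L : List Int) (n : Int) : List (List Int) :=
  combB (PySem.List.sorted (PySem.Set.ofList L) (fun x => x) false) n

-- ===== PRECONDITION & SPEC =====
-- A's recursion depth is n, so A raises RecursionError exactly for n < 0 (no base case is ever
-- reached) and for n ≥ 998 (CPython's default recursion limit, measured at top level); Pre_
-- admits every n on which A returns.
def Pre_sortedVar (L : List Int) (n : Int) : Prop := 0 ≤ n ∧ n ≤ 997
instance (L : List Int) (n : Int) : Decidable (Pre_sortedVar L n) := by unfold Pre_sortedVar; infer_instance
def pvWitness_sortedVar : List Int × Int := ([3, 1, 2, 1], 2)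

def Spec_sortedVar (L : List Int) (n : Int) (out : List (List Int)) : Prop := out = sortedVar_alt L n
instance (L : List Int) (n : Int) (out : List (List Int)) : Decidable (Spec_sortedVar L n out) := by unfold Spec_sortedVar; infer_instance

-- ===== CLAIM (what is proved, stated in full; the proofs are below) =====
def Claim_equal_sortedVar : Prop := ∀ (L : List Int) (n : Int), Dom_sortedVar L n → Pre_sortedVar L n → Spec_sortedVar L n (sortedVar L n)

-- ===== LEMMAS AND PROOFS =====

lemma combB_eq_combinations (vals : List Int) (k : Nat) :
    combB vals (k : Int) = PySem.List.combinations vals k := by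
  induction vals generalizing k with
  | nil =>
    cases k with
    | zero => simp [combB, PySem.List.combinations_zero]
    | succ k => simp [combB, PySem.List.combinations_nil_succ]; omega
  | cons v rest ih =>
    cases k with
    | zero => simp [combB, PySem.List.combinations_zero]
    | succ k =>
      have h1 : ((k + 1 : Nat) : Int) ≠ 0 := by omega
      have h2 : ((k + 1 : Nat) : Int) - 1 = (k : Int) := by omega
      rw [combB, if_neg h1, h2, ih, ih, PySem.List.combinations_cons_succ]

lemma nodup_concat_iff (t : List Int) (y : Int) : (t ++ [y]).Nodup ↔ t.Nodup ∧ y ∉ t := by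
  rw [List.nodup_append]
  simp
  intro _
  exact ⟨fun h hy => h y hy rfl, fun h a ha he => h (he ▸ ha)⟩

lemma mem_varsA (L : List Int) (k : Nat) (t : List Int) :
    t ∈ varsA L k ↔ t.length = k ∧ t.Nodup ∧ ∀ y ∈ t, y ∈ L := by
  induction k generalizing t with
  | zero => simp [varsA, List.length_eq_zero_iff]; rintro rfl; simp
  | succ k ih =>
    simp only [varsA, List.mem_flatMap, List.mem_map, List.mem_filter]
    constructor
    · rintro ⟨y, hy, t', ⟨ht', hyt'⟩, rfl⟩
      rw [ih] at ht'
      obtain ⟨hlen, hnd, hmem⟩ := ht'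
      have hynot : y ∉ t' := by simpa using hyt'
      refine ⟨by simp [hlen], (nodup_concat_iff t' y).mpr ⟨hnd, hynot⟩, ?_⟩
      intro z hz
      rcases List.mem_append.mp hz with h | h
      · exact hmem z h
      · simpa using (List.mem_singleton.mp h) ▸ hy
    · rintro ⟨hlen, hnd, hmem⟩
      have hne : t ≠ [] := by intro h; simp [h] at hlen
      refine ⟨t.getLast hne, hmem _ (List.getLast_mem hne), t.dropLast, ⟨?_, ?_⟩, List.dropLast_append_getLast hne⟩
      · rw [ih]
        have hsub : t.dropLast.Sublist t := List.dropLast_sublist t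
        refine ⟨by simp [hlen], hnd.sublist hsub, fun y hy => hmem y (hsub.subset hy)⟩
      · have := (nodup_concat_iff t.dropLast (t.getLast hne)).mp
          (by rw [List.dropLast_append_getLast hne]; exact hnd)
        simpa using this.2

lemma sublist_of_pairwise_lt_subset (vals : List Int) (s : List Int)
    (hs : s.Pairwise (· < ·)) (hv : vals.Pairwise (· < ·)) (hsub : s ⊆ vals) :
    s.Sublist vals := by
  induction vals generalizing s with
  | nil => simpa using List.subset_nil.mp hsub
  | cons v vr ih =>
    cases s with
    | nil => exact List.nil_sublist _
    | cons a st =>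
      rcases List.pairwise_cons.mp hv with ⟨hvlt, hvr⟩
      rcases List.pairwise_cons.mp hs with ⟨halt, hst⟩
      by_cases hav : a = v
      · subst hav
        refine List.Sublist.cons₂ a (ih st hst hvr ?_)
        intro x hx
        rcases List.mem_cons.mp (hsub (List.mem_cons_of_mem a hx)) with h | h
        · exact absurd (h ▸ halt x hx) (lt_irrefl a)
        · exact h
      · have hmem : a :: st ⊆ vr := by
          intro x hx
          rcases List.mem_cons.mp (hsub hx) with h | h
          · subst h
            rcases List.mem_cons.mp hx with h | h
            · exact absurd h (fun he => hav he.symm)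
            · have h1 := halt x h
              have h2 : x < a := by
                rcases List.mem_cons.mp (hsub List.mem_cons_self) with h' | h'
                · exact absurd h' hav
                · exact hvlt a h'
              omega
          · exact h
        exact List.Sublist.cons v (ih (a :: st) hs hvr hmem)

lemma nodup_combinations (vals : List Int) (r : Nat) (h : vals.Nodup) :
    (PySem.List.combinations vals r).Nodup := by
  induction vals generalizing r with
  | nil =>
    cases r with
    | zero => simp [PySem.List.combinations_zero]
    | succ r => simp [PySem.List.combinations_nil_succ]
  | cons v rest ih =>
    rcases List.nodup_cons.mp h with ⟨hv, hrest⟩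
    cases r with
    | zero => simp [PySem.List.combinations_zero]
    | succ r =>
      rw [PySem.List.combinations_cons_succ, List.nodup_append]
      refine ⟨(ih r hrest).map (fun a b hab => by simpa using hab), ih (r+1) hrest, ?_⟩
      intro x hx1 y hy2
      rcases List.mem_map.mp hx1 with ⟨t, _, rfl⟩
      rw [PySem.List.mem_combinations_iff] at hy2
      rcases hy2 with ⟨hsuby, _⟩
      intro he
      rw [← he] at hsuby
      exact hv (hsuby.subset List.mem_cons_self)

lemma pairwise_le_combinations (vals : List Int) (r : Nat) (h : vals.Pairwise (· < ·)) :
    (PySem.List.combinations vals r).Pairwise (· ≤ ·) := by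
  induction vals generalizing r with
  | nil =>
    cases r with
    | zero => simp [PySem.List.combinations_zero]
    | succ r => simp [PySem.List.combinations_nil_succ]
  | cons v rest ih =>
    rcases List.pairwise_cons.mp h with ⟨hvlt, hrest⟩
    cases r with
    | zero => simp [PySem.List.combinations_zero]
    | succ r =>
      rw [PySem.List.combinations_cons_succ, List.pairwise_append]
      refine ⟨(ih r hrest).map _ (fun {a b} hab => List.cons_le_cons v hab), ih (r+1) hrest, ?_⟩
      intro x hx1 y hy1
      rcases List.mem_map.mp hx1 with ⟨t, _, rfl⟩
      rw [PySem.List.mem_combinations_iff] at hy1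
      rcases hy1 with ⟨hsuby, hleny⟩
      cases y with
      | nil => simp at hleny
      | cons h2 y' =>
        have hmem : h2 ∈ rest := hsuby.subset List.mem_cons_self
        exact le_of_lt (List.Lex.rel (hvlt h2 hmem))

lemma sorted_id_eq' (xs ys : List (List Int)) (h1 : ys.Perm xs) (h2 : ys.Pairwise (· ≤ ·)) :
    PySem.List.sorted xs (fun v => v) false = ys := by
  have h := PySem.List.sorted_id_eq_of_perm_of_pairwise xs ys h1 h2
  convert h using 2

theorem sortedVar_spec_aux (L : List Int) (n : Int) (hn : 0 ≤ n) :
    sortedVar L n = sortedVar_alt L n := by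
  unfold sortedVar sortedVar_alt
  simp only []
  show PySem.List.sorted (List.foldl (fun acc s => if s ∈ acc then acc else acc ++ [s]) [] (List.foldl (fun acc var => acc ++ [PySem.List.sorted var (fun x => x) false]) [] (PySem.List.sorted (varsA L n.toNat) (fun v => v) false))) (fun v => v) false = combB (PySem.List.sorted (PySem.Set.ofList L) (fun x => x) false) n
  set vals := PySem.List.sorted (PySem.Set.ofList L) (fun x => x) false with hvals
  have hvp : vals.Pairwise (· < ·) := PySem.List.sorted_ofList_pairwise_lt L
  have hvnd : vals.Nodup := hvp.imp ne_of_lt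
  have hvmem : ∀ x, x ∈ vals ↔ x ∈ L := by
    intro x
    rw [hvals, PySem.List.mem_sorted, PySem.Set.mem_ofList]
  have hf : (fun (acc : List (List Int)) s => if s ∈ acc then acc else acc ++ [s])
      = PySem.Set.add := by
    funext acc s
    rw [PySem.Set.add_eq_ite]
  rw [PySem.List.foldl_append_singleton_eq_map, List.nil_append, hf, ← PySem.Set.ofList_eq_foldl]
  have hn' : ((n.toNat : Nat) : Int) = n := Int.toNat_of_nonneg hn
  have hcomb : combB vals n = PySem.List.combinations vals n.toNat := by
    calc combB vals n = combB vals ((n.toNat : Nat) : Int) := by rw [hn']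
      _ = PySem.List.combinations vals n.toNat := combB_eq_combinations vals n.toNat
  rw [hcomb]
  apply sorted_id_eq'
  · rw [List.perm_ext_iff_of_nodup (nodup_combinations vals n.toNat hvnd) (PySem.Set.nodup_ofList _)]
    intro s
    rw [PySem.List.mem_combinations_iff, PySem.Set.mem_ofList, List.mem_map]
    constructor
    · rintro ⟨hsub, hlen⟩
      have hslt : s.Pairwise (· < ·) := hvp.sublist hsub
      refine ⟨s, ?_, ?_⟩
      · rw [PySem.List.mem_sorted, mem_varsA]
        exact ⟨hlen, hslt.imp ne_of_lt, fun y hy => (hvmem y).mp (hsub.subset hy)⟩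
      · exact PySem.List.sorted_eq_self_of_pairwise _ _ (hslt.imp (fun h => le_of_lt h))
    · rintro ⟨v, hv, rfl⟩
      rw [PySem.List.mem_sorted, mem_varsA] at hv
      obtain ⟨hlen, hnd, hmem⟩ := hv
      have hperm : (PySem.List.sorted v (fun x => x) false).Perm v := PySem.List.sorted_perm _ _ _
      have hle : (PySem.List.sorted v (fun x => x) false).Pairwise (· ≤ ·) :=
        PySem.List.sorted_pairwise _ _
      have hnd' : (PySem.List.sorted v (fun x => x) false).Nodup := hperm.nodup_iff.mpr hnd
      have hlt : (PySem.List.sorted v (fun x => x) false).Pairwise (· < ·) :=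
        (hle.and hnd').imp (fun h => lt_of_le_of_ne h.1 h.2)
      refine ⟨sublist_of_pairwise_lt_subset vals _ hlt hvp ?_, by rw [hperm.length_eq, hlen]⟩
      intro x hx
      exact (hvmem x).mpr (hmem x (hperm.subset hx))
  · exact pairwise_le_combinations vals n.toNat hvp

-- ===== VERDICT (by name: the statement is the Claim_ definition above) =====
theorem sortedVar_spec : Claim_equal_sortedVar := by
  intro L n _ hpre
  exact sortedVar_spec_aux L n hpre.1
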